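-- pv_equiv track=rewrite | github.com/JohaGonzalez/parcial-tecnicas-programacion | ejercicio2.py | mapaInvalido
-- ===== SOURCE A (Python) =====
-- def mapaInvalido(mapa):
--
--     if mapa == []:
--         return True
--
--     longitudFilas = []
--
--     for index, fila in enumerate(mapa):
--
--         longitudFilas.append(len(fila))
--
--         if longitudFilas[index] == 0:
--             return True
--
--         if index > 0:
--             if longitudFilas[index] != longitudFilas[index-1]:
--                 return True
--
--         for letra in fila:
--             if letra != '.' and letra != 'b':
--                 return True
--
--     return False
-- ===== SOURCE B (Python) =====
-- def mapaInvalido(mapa):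
--     if not mapa:
--         return True
--     lengths = {len(f) for f in mapa}
--     if 0 in lengths or len(lengths) != 1:
--         return True
--     for fila in mapa:
--         for letra in fila:
--             if letra not in '.b':
--                 return True
--     return False
-- ===== Notes on version B (the rewrite author's own statement) =====
-- stated objective: simpler
-- what changed: Replaces A's single interleaved pass (maintained list of row lengths with consecutive comparisons and an inline char scan) by two separate passes: a set-of-row-lengths check, then a plain character scan.
import Mathlib
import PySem

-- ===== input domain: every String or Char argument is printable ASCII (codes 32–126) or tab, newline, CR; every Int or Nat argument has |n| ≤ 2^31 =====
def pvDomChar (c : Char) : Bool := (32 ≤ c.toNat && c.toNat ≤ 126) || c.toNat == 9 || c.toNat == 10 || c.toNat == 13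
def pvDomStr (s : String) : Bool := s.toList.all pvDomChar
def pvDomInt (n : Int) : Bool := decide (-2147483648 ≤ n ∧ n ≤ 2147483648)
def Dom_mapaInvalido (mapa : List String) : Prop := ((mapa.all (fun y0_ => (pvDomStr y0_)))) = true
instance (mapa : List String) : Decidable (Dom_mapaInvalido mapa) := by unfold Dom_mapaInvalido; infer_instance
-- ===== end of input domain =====

-- B replaces A's single interleaved pass with two separate passes (set-of-lengths check, then char scan); objective: simpler.

-- ===== PORT A =====
-- the 'for index, fila in enumerate(mapa)' loop, carrying the running longitudFilas list
def mapaA_loop : List String → Nat → List Nat → Bool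
  | [], _, _ => false
  | fila :: rest, index, longitudFilas =>
    let lf := longitudFilas ++ [fila.toList.length]
    if lf.getD index 0 = 0 then true
    else if 0 < index ∧ lf.getD index 0 ≠ lf.getD (index - 1) 0 then true
    else if fila.toList.any (fun letra => !(letra == '.') && !(letra == 'b')) then true
    else mapaA_loop rest (index + 1) lf

def mapaInvalido (mapa : List String) : Bool :=
  if mapa = [] then true
  else mapaA_loop mapa 0 []

-- ===== PORT B =====
def mapaInvalido_alt (mapa : List String) : Bool :=
  if mapa = [] then true
  else
    let lengths : PySem.Set Nat := PySem.Set.ofList (mapa.map (fun f => f.toList.length))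
    if lengths.contains 0 || !(lengths.length = 1 : Bool) then true
    else if mapa.any (fun fila => fila.toList.any (fun letra => !(".b".toList.contains letra))) then true
    else false

-- ===== PRECONDITION & SPEC =====
def Spec_mapaInvalido (mapa : List String) (out : Bool) : Prop := out = mapaInvalido_alt mapa
instance (mapa : List String) (out : Bool) : Decidable (Spec_mapaInvalido mapa out) := by unfold Spec_mapaInvalido; infer_instance

-- ===== CLAIM (what is proved, stated in full; the proofs are below) =====
def Claim_equal_mapaInvalido : Prop := ∀ (mapa : List String), Dom_mapaInvalido mapa → Spec_mapaInvalido mapa (mapaInvalido mapa)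

-- ===== LEMMAS AND PROOFS =====

-- bad-row test, shared shape of both ports' inner character scans
def badRow (f : String) : Bool := f.toList.any (fun letra => !(letra == '.') && !(letra == 'b'))

theorem badRow_eq_B (f : String) :
    f.toList.any (fun letra => !(".b".toList.contains letra)) = badRow f := by
  unfold badRow
  congr 1
  funext c
  have hs : ".b".toList = ['.', 'b'] := rfl
  rw [hs]
  cases h1 : c == '.' <;> cases h2 : c == 'b' <;> simp [List.contains, List.elem, h1, h2]

-- chain prev rest: what A's loop computes after the first row, comparing each row to the previous one
def chain : Nat → List String → Bool
  | _, [] => false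
  | prev, f :: rest =>
    (f.toList.length = 0 : Bool) || !(f.toList.length = prev : Bool) || badRow f
      || chain f.toList.length rest

theorem getD_concat_length {l : List Nat} {a : Nat} : (l ++ [a]).getD l.length 0 = a := by
  simp [List.getD_eq_getElem?_getD]

theorem getD_concat_pred {l : List Nat} {a prev : Nat} (h : l ≠ []) (hl : l.getLast h = prev) :
    (l ++ [a]).getD (l.length - 1) 0 = prev := by
  have hpos : 0 < l.length := List.length_pos_iff.mpr h
  have hlt : l.length - 1 < l.length := by omega
  rw [List.getD_eq_getElem?_getD, List.getElem?_append_left hlt,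
    List.getElem?_eq_getElem hlt]
  simp [← hl, List.getLast_eq_getElem]

theorem loop_eq_chain (rest : List String) : ∀ (l : List Nat) (prev : Nat) (h : l ≠ []),
    l.getLast h = prev → mapaA_loop rest l.length l = chain prev rest := by
  induction rest with
  | nil => intro l prev h hl; rfl
  | cons f r ih =>
    intro l prev h hl
    have hpos : 0 < l.length := List.length_pos_iff.mpr h
    have ih' := ih (l ++ [f.toList.length]) f.toList.length (by simp) (by simp)
    rw [List.length_append, List.length_singleton] at ih'
    show mapaA_loop (f :: r) l.length l = chain prev (f :: r)
    rw [mapaA_loop, chain]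
    simp only [getD_concat_length, getD_concat_pred h hl]
    by_cases h0 : f.toList.length = 0
    · rw [if_pos h0, h0]; simp
    · rw [if_neg h0]
      by_cases hne : f.toList.length = prev
      · rw [if_neg (by rintro ⟨_, hc⟩; exact hc hne)]
        have h0' : ¬ prev = 0 := by rw [← hne]; exact h0
        by_cases hb : badRow f
        · rw [if_pos (by simpa [badRow] using hb)]
          simp [h0', hne, hb]
        · rw [if_neg (by simpa [badRow] using hb), ih']
          simp [h0', hne, Bool.eq_false_iff.mpr hb]
      · rw [if_pos ⟨hpos, by simpa using hne⟩]
        have hd : decide (f.toList.length = prev) = false := decide_eq_false hne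
        simp only [hd, Bool.not_false, Bool.true_or, Bool.or_true]

-- chain prev rest is true iff some row has a zero length / bad char, or some length differs from prev
theorem chain_iff (rest : List String) : ∀ (prev : Nat),
    chain prev rest = (rest.any (fun f => (f.toList.length = 0 : Bool) || badRow f)
      || !(rest.all (fun f => (f.toList.length = prev : Bool)))) := by
  induction rest with
  | nil => intro prev; rfl
  | cons f r ih =>
    intro prev
    by_cases hne : f.toList.length = prev
    · subst hne
      simp [chain, ih, List.any_cons, List.all_cons, Bool.or_assoc]
    · have hd : decide (f.toList.length = prev) = false := decide_eq_false hne
      simp only [chain, ih, List.any_cons, List.all_cons, Bool.not_and, hd, Bool.not_false,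
        Bool.true_or, Bool.or_true]

-- the set of lengths is a singleton iff every length equals the head's
theorem ofList_singleton_iff (a : Nat) (l : List Nat) :
    (PySem.Set.ofList (a :: l)).length = 1 ↔ ∀ x ∈ l, x = a := by
  constructor
  · intro h x hx
    have hxm : x ∈ PySem.Set.ofList (a :: l) := (PySem.Set.mem_ofList _ _).mpr (by simp [hx])
    have ham : a ∈ PySem.Set.ofList (a :: l) := (PySem.Set.mem_ofList _ _).mpr (by simp)
    obtain ⟨y, hy⟩ := List.length_eq_one_iff.mp h
    rw [hy] at hxm ham
    simp only [List.mem_singleton] at hxm ham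
    rw [hxm, ham]
  · intro h
    have hd : (PySem.Set.ofList l).discard a = [] := by
      apply List.eq_nil_iff_forall_not_mem.mpr
      intro x hx
      rw [PySem.Set.mem_discard] at hx
      exact hx.2 (h x ((PySem.Set.mem_ofList _ _).mp hx.1))
    rw [PySem.Set.ofList_cons, hd]
    rfl

theorem any_or_of_left_false {α : Type} (p q : α → Bool) (l : List α)
    (h : ∀ x ∈ l, p x = false) : l.any (fun x => p x || q x) = l.any q := by
  induction l with
  | nil => rfl
  | cons a t ih =>
    rw [List.any_cons, List.any_cons, h a (List.mem_cons_self), Bool.false_or,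
      ih (fun x hx => h x (List.mem_cons_of_mem a hx))]

-- ===== VERDICT (by name: the statement is the Claim_ definition above) =====
theorem mapaInvalido_spec : Claim_equal_mapaInvalido := by
  intro mapa _
  unfold Spec_mapaInvalido mapaInvalido mapaInvalido_alt
  match mapa with
  | [] => rfl
  | f :: rest =>
    simp only [if_neg (List.cons_ne_nil f rest)]
    have hA : mapaA_loop (f :: rest) 0 [] =
        ((f.toList.length = 0 : Bool) || badRow f || chain f.toList.length rest) := by
      simp only [mapaA_loop, List.nil_append, Nat.zero_sub, List.getD_cons_zero]
      rw [if_neg (show ¬(0 < 0 ∧ f.toList.length ≠ f.toList.length) by simp)]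
      by_cases h0 : f.toList.length = 0
      · rw [if_pos h0, h0]; simp
      · rw [if_neg h0]
        by_cases hb : badRow f
        · rw [if_pos (by simpa [badRow] using hb)]
          simp [hb]
        · rw [if_neg (by simpa [badRow] using hb)]
          have hc := loop_eq_chain rest [f.toList.length] f.toList.length (by simp) (by simp)
          rw [List.length_singleton] at hc
          rw [hc, decide_eq_false h0, Bool.eq_false_iff.mpr hb]
          simp
    rw [hA, chain_iff]
    -- the B-side character scan equals badRow on each row
    have hbody : ((f :: rest).any fun fila => fila.toList.any (fun letra => !(".b".toList.contains letra)))
        = (badRow f || rest.any badRow) := by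
      rw [List.any_cons, badRow_eq_B]
      congr 1
      exact List.any_congr rfl badRow_eq_B
    by_cases hzero : ∃ g ∈ f :: rest, g.toList.length = 0
    · -- some row is empty: both sides are true
      obtain ⟨g, hgmem, hg0⟩ := hzero
      have hB : (PySem.Set.ofList ((f :: rest).map (fun g => g.toList.length))).contains 0 = true := by
        rw [PySem.Set.contains_iff, PySem.Set.mem_ofList]
        exact List.mem_map.mpr ⟨g, hgmem, hg0⟩
      rw [if_pos (show _ = true by rw [hB]; rfl)]
      rw [List.mem_cons] at hgmem
      rcases hgmem with rfl | hgmem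
      · rw [hg0]; simp
      · have hany : (rest.any fun x => decide (x.toList.length = 0) || badRow x) = true :=
          List.any_eq_true.mpr ⟨g, hgmem, by rw [hg0]; rfl⟩
        rw [hany]; simp
    · push_neg at hzero
      have hB0 : (PySem.Set.ofList ((f :: rest).map (fun g => g.toList.length))).contains 0 = false := by
        rw [Bool.eq_false_iff]
        intro hc
        rw [PySem.Set.contains_iff, PySem.Set.mem_ofList, List.mem_map] at hc
        obtain ⟨g, hg, hg0⟩ := hc
        exact hzero g hg hg0
      by_cases hlen : ∀ g ∈ rest, g.toList.length = f.toList.length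
      · -- all lengths equal and nonzero: the set of lengths is the singleton {len f}
        have h1 : (PySem.Set.ofList ((f :: rest).map (fun g => g.toList.length))).length = 1 := by
          rw [List.map_cons]
          exact (ofList_singleton_iff _ _).mpr (by
            intro x hx; rw [List.mem_map] at hx; obtain ⟨g, hg, rfl⟩ := hx; exact hlen g hg)
        rw [if_neg (by rw [hB0, h1]; simp)]
        have hall : rest.all (fun g => (g.toList.length = f.toList.length : Bool)) = true :=
          List.all_eq_true.mpr (fun g hg => decide_eq_true (hlen g hg))
        have hf0 : (f.toList.length = 0 : Bool) = false :=
          decide_eq_false (hzero f (List.mem_cons_self))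
        have hany : (rest.any fun x => (x.toList.length = 0 : Bool) || badRow x) = rest.any badRow :=
          any_or_of_left_false _ _ _
            (fun x hx => decide_eq_false (hzero x (List.mem_cons_of_mem f hx)))
        rw [hf0, hall, hany, hbody]
        cases badRow f <;> cases rest.any badRow <;> rfl
      · -- two different lengths: the set has at least two elements, both sides true
        push_neg at hlen
        have h1 : (PySem.Set.ofList ((f :: rest).map (fun g => g.toList.length))).length ≠ 1 := by
          rw [List.map_cons]
          intro h
          obtain ⟨g, hg, hgn⟩ := hlen
          exact hgn ((ofList_singleton_iff _ _).mp h _ (List.mem_map.mpr ⟨g, hg, rfl⟩))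
        rw [if_pos (show _ = true by rw [hB0, decide_eq_false h1]; rfl)]
        obtain ⟨g, hg, hgn⟩ := hlen
        have hallf : rest.all (fun x => (x.toList.length = f.toList.length : Bool)) = false := by
          refine Bool.eq_false_iff.mpr fun h => hgn ?_
          exact of_decide_eq_true (List.all_eq_true.mp h g hg)
        rw [hallf]
        simp
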